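-- pv_equiv track=rewrite | github.com/rudidev08/x4-foundations-version-diff | src/lib/macro_diff.py | diff_attr_map
-- ===== SOURCE A (Python) =====
-- def diff_attr_map(old_map: dict[str, str],
--                   new_map: dict[str, str]) -> list[str]:
--     """Compare two flat attribute maps; emit `key old→new` labels for differences."""
--     out: list[str] = []
--     for k in sorted(set(old_map) | set(new_map)):
--         old_value = old_map.get(k)
--         new_value = new_map.get(k)
--         if old_value == new_value:
--             continue
--         out.append(f'{k} {old_value}→{new_value}')
--     return out
-- ===== SOURCE B (Python) =====
-- def diff_attr_map(old_map: dict[str, str],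
--                   new_map: dict[str, str]) -> list[str]:
--     """Sort-merge join: sort each map's items by key once, then walk the two
--     sorted lists in lockstep with two pointers, emitting labels in key order."""
--     a = sorted(old_map.items(), key=lambda kv: kv[0])
--     b = sorted(new_map.items(), key=lambda kv: kv[0])
--     out: list[str] = []
--     i = j = 0
--     while i < len(a) and j < len(b):
--         ka, va = a[i]
--         kb, vb = b[j]
--         if ka < kb:
--             out.append(f'{ka} {va}→None')
--             i += 1
--         elif kb < ka:
--             out.append(f'{kb} None→{vb}')
--             j += 1
--         else:
--             if va != vb:
--                 out.append(f'{ka} {va}→{vb}')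
--             i += 1
--             j += 1
--     while i < len(a):
--         k, v = a[i]
--         out.append(f'{k} {v}→None')
--         i += 1
--     while j < len(b):
--         k, v = b[j]
--         out.append(f'{k} None→{v}')
--         j += 1
--     return out
-- ===== Notes on version B (the rewrite author's own statement) =====
-- stated objective: alternative
-- what changed: B replaces the union-set + per-key dict lookups with a sort-merge join: it sorts each map's items by key once and walks the two sorted lists in lockstep with two pointers, emitting labels directly; A builds the sorted key union and probes both dicts for every key.
import Mathlib
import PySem

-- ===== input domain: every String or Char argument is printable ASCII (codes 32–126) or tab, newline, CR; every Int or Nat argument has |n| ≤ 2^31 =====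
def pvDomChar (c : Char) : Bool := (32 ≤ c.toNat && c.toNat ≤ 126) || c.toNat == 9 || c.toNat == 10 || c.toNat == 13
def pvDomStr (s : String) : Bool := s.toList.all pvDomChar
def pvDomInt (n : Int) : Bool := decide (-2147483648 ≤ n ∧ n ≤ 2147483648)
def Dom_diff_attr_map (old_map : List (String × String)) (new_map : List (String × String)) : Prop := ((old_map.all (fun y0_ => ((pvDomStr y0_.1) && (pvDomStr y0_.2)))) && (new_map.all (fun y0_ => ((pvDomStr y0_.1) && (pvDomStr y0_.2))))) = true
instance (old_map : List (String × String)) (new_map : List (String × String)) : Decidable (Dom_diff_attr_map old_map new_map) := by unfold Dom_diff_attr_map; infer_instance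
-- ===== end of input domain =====

-- B replaces A's sorted-key-union + per-key dict lookups by a sort-merge join over the two
-- key-sorted item lists (objective: alternative). Shared helper: pvFmt = f'{k} {old}→{new}'.

-- f'{k} {old_value}→{new_value}'; None prints as "None" — exact on the whole domain
def pvOptChars : Option String → List Char
  | none => "None".toList
  | some s => s.toList

def pvFmt (k : String) (ov nv : Option String) : String :=
  String.ofList (k.toList ++ ' ' :: pvOptChars ov ++ '→' :: pvOptChars nv)

-- dict .get (Python dict built from the pair list: last duplicate wins, first position kept)
def pvGet (m : List (String × String)) (k : String) : Option String :=
  (PySem.Dict.ofList m).get? k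

-- ===== PORT A =====
def diff_attr_map (old_map : List (String × String)) (new_map : List (String × String)) : List String :=
  (PySem.List.sorted
      (PySem.Set.union (PySem.Set.ofList (old_map.map Prod.fst))
        (PySem.Set.ofList (new_map.map Prod.fst)))
      (fun k => k) false).foldl
    (fun out k =>
      let old_value := pvGet old_map k
      let new_value := pvGet new_map k
      if old_value == new_value then out
      else out ++ [pvFmt k old_value new_value]) []

-- ===== PORT B =====
-- the two-pointer while loop of Source B, as the obvious structural recursion on the two suffixes
def pvMerge : List (String × String) → List (String × String) → List String
  | [], bs => bs.map (fun p => pvFmt p.1 none (some p.2))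
  | as_, [] => as_.map (fun p => pvFmt p.1 (some p.2) none)
  | (ka, va) :: as_, (kb, vb) :: bs =>
    if ka < kb then pvFmt ka (some va) none :: pvMerge as_ ((kb, vb) :: bs)
    else if kb < ka then pvFmt kb none (some vb) :: pvMerge ((ka, va) :: as_) bs
    else (if va == vb then [] else [pvFmt ka (some va) (some vb)]) ++ pvMerge as_ bs
termination_by a b => a.length + b.length

def diff_attr_map_alt (old_map : List (String × String)) (new_map : List (String × String)) : List String :=
  pvMerge
    (PySem.List.sorted (PySem.Dict.ofList old_map).items (fun kv => kv.1) false)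
    (PySem.List.sorted (PySem.Dict.ofList new_map).items (fun kv => kv.1) false)

-- ===== PRECONDITION & SPEC =====
def Spec_diff_attr_map (old_map : List (String × String)) (new_map : List (String × String)) (out : List String) : Prop := out = diff_attr_map_alt old_map new_map
instance (old_map : List (String × String)) (new_map : List (String × String)) (out : List String) : Decidable (Spec_diff_attr_map old_map new_map out) := by unfold Spec_diff_attr_map; infer_instance

-- ===== CLAIM (what is proved, stated in full; the proofs are below) =====
def Claim_equal_diff_attr_map : Prop := ∀ (old_map : List (String × String)) (new_map : List (String × String)), Dom_diff_attr_map old_map new_map → Spec_diff_attr_map old_map new_map (diff_attr_map old_map new_map)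

-- ===== LEMMAS AND PROOFS =====

-- first-match lookup in a pair list (proof-only helper)
def pvLook : List (String × String) → String → Option String
  | [], _ => none
  | (k, v) :: t, q => if k == q then some v else pvLook t q

-- key-merge of two strictly sorted key lists, dropping the duplicate on equality
def mergeK : List String → List String → List String
  | [], ys => ys
  | xs, [] => xs
  | x :: xs, y :: ys =>
    if x < y then x :: mergeK xs (y :: ys)
    else if y < x then y :: mergeK (x :: xs) ys
    else x :: mergeK xs ys
termination_by xs ys => xs.length + ys.length

-- the per-key label selector, over the two maps / over the two item lists
def pvF (om nm : List (String × String)) (k : String) : Option String :=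
  if pvGet om k == pvGet nm k then none else some (pvFmt k (pvGet om k) (pvGet nm k))

def pvFL (a b : List (String × String)) (k : String) : Option String :=
  if pvLook a k == pvLook b k then none else some (pvFmt k (pvLook a k) (pvLook b k))

theorem pvLook_eq_none_iff (l : List (String × String)) (k : String) :
    pvLook l k = none ↔ k ∉ l.map Prod.fst := by
  induction l with
  | nil => simp [pvLook]
  | cons p t ih =>
    obtain ⟨k', v⟩ := p
    by_cases h : k' = k
    · subst h; simp [pvLook]
    · have hb : (k' == k) = false := by simp [h]
      have h' : k ≠ k' := fun hh => h hh.symm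
      rw [show pvLook ((k', v) :: t) k = pvLook t k from by simp [pvLook, hb], ih]
      simp [h']

theorem pvLook_some_mem (l : List (String × String)) (k : String) (v : String)
    (h : pvLook l k = some v) : (k, v) ∈ l := by
  induction l with
  | nil => simp [pvLook] at h
  | cons p t ih =>
    obtain ⟨k', v'⟩ := p
    by_cases hk : k' = k
    · subst hk; simp [pvLook] at h; simp [h]
    · simp [pvLook, hk] at h
      exact List.mem_cons_of_mem _ (ih h)

theorem pvLook_of_mem (l : List (String × String)) (k v : String)
    (h : (k, v) ∈ l) (hnd : (l.map Prod.fst).Nodup) : pvLook l k = some v := by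
  induction l with
  | nil => simp at h
  | cons p t ih =>
    obtain ⟨k', v'⟩ := p
    rcases List.mem_cons.mp h with h1 | h1
    · obtain ⟨rfl, rfl⟩ := Prod.mk.injEq .. ▸ h1
      simp [pvLook]
    · have hk : k' ≠ k := by
        rintro rfl
        exact (List.nodup_cons.mp hnd).1 (List.mem_map.mpr ⟨_, h1, rfl⟩)
      simp [pvLook, hk]
      exact ih h1 (List.nodup_cons.mp hnd).2

theorem mem_mergeK : ∀ (xs ys : List String) (k : String),
    k ∈ mergeK xs ys ↔ k ∈ xs ∨ k ∈ ys := by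
  intro xs
  induction xs with
  | nil => intro ys k; simp [mergeK]
  | cons x xs ihx =>
    intro ys
    induction ys with
    | nil => intro k; simp [mergeK]
    | cons y ys ihy =>
      intro k
      rcases lt_trichotomy x y with h | h | h
      · simp [mergeK, h, ihx (y :: ys) k]; tauto
      · subst h
        simp [mergeK, lt_irrefl, ihx ys k]; tauto
      · simp [mergeK, h, not_lt_of_gt h, ihy k]; tauto

theorem pairwise_mergeK : ∀ (xs ys : List String),
    xs.Pairwise (· < ·) → ys.Pairwise (· < ·) → (mergeK xs ys).Pairwise (· < ·) := by
  intro xs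
  induction xs with
  | nil => intro ys _ hy; simpa [mergeK] using hy
  | cons x xs ihx =>
    intro ys
    induction ys with
    | nil => intro hx _; simpa [mergeK] using hx
    | cons y ys ihy =>
      intro hx hy
      rcases lt_trichotomy x y with h | h | h
      · rw [show mergeK (x :: xs) (y :: ys) = x :: mergeK xs (y :: ys) by simp [mergeK, h]]
        refine List.pairwise_cons.mpr ⟨?_, ihx (y :: ys) hx.tail hy⟩
        intro z hz
        rcases (mem_mergeK xs (y :: ys) z).mp hz with hz | hz
        · exact List.pairwise_cons.mp hx |>.1 z hz
        · rcases List.mem_cons.mp hz with rfl | hz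
          · exact h
          · exact h.trans (List.pairwise_cons.mp hy |>.1 z hz)
      · subst h
        rw [show mergeK (x :: xs) (x :: ys) = x :: mergeK xs ys by simp [mergeK, lt_irrefl]]
        refine List.pairwise_cons.mpr ⟨?_, ihx ys hx.tail hy.tail⟩
        intro z hz
        rcases (mem_mergeK xs ys z).mp hz with hz | hz
        · exact List.pairwise_cons.mp hx |>.1 z hz
        · exact List.pairwise_cons.mp hy |>.1 z hz
      · rw [show mergeK (x :: xs) (y :: ys) = y :: mergeK (x :: xs) ys by
            simp [mergeK, h, not_lt_of_gt h]]
        refine List.pairwise_cons.mpr ⟨?_, ihy hx hy.tail⟩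
        intro z hz
        rcases (mem_mergeK (x :: xs) ys z).mp hz with hz | hz
        · rcases List.mem_cons.mp hz with rfl | hz
          · exact h
          · exact h.trans (List.pairwise_cons.mp hx |>.1 z hz)
        · exact List.pairwise_cons.mp hy |>.1 z hz

-- A's appending loop is filterMap of the label selector
theorem A_foldl (om nm : List (String × String)) (l : List String) (acc : List String) :
    l.foldl (fun out k =>
      if pvGet om k == pvGet nm k then out
      else out ++ [pvFmt k (pvGet om k) (pvGet nm k)]) acc
    = acc ++ l.filterMap (pvF om nm) := by
  induction l generalizing acc with
  | nil => simp
  | cons x t ih =>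
    rw [List.foldl_cons, List.filterMap_cons]
    by_cases h : (pvGet om x == pvGet nm x) = true
    · rw [if_pos h, ih, show pvF om nm x = none from by rw [pvF, if_pos h]]
    · rw [if_neg h, ih, show pvF om nm x = some (pvFmt x (pvGet om x) (pvGet nm x)) from by
        rw [pvF, if_neg h]]
      simp

-- pairwise-lt on the keys of the key-sorted item list of a dict
theorem sorted_items_pairwise (m : List (String × String)) :
    (PySem.List.sorted (PySem.Dict.ofList m).items (fun kv => kv.1) false).Pairwise
      (fun p q => p.1 < q.1) := by
  have hle := PySem.List.sorted_pairwise (PySem.Dict.ofList m).items (fun kv => kv.1)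
  have hperm : (PySem.List.sorted (PySem.Dict.ofList m).items (fun kv => kv.1) false).Perm
      (PySem.Dict.ofList m).items := PySem.List.sorted_perm _ _ _
  have hndk : ((PySem.Dict.ofList m).items.map Prod.fst).Nodup := by
    simpa [PySem.Dict.keys] using PySem.Dict.nodup_keys_ofList (κ := String) (ν := String) m
  have hnda : ((PySem.List.sorted (PySem.Dict.ofList m).items (fun kv => kv.1) false).map
      Prod.fst).Nodup := ((hperm.map Prod.fst).nodup_iff).mpr hndk
  have hne := List.pairwise_map.mp hnda
  exact (hle.and hne).imp (fun h => lt_of_le_of_ne h.1 h.2)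

theorem pvLook_sorted_eq_get? (m : List (String × String)) (k : String) :
    pvLook (PySem.List.sorted (PySem.Dict.ofList m).items (fun kv => kv.1) false) k
      = pvGet m k := by
  have hperm : (PySem.List.sorted (PySem.Dict.ofList m).items (fun kv => kv.1) false).Perm
      (PySem.Dict.ofList m).items := PySem.List.sorted_perm _ _ _
  have hnd : (PySem.Dict.ofList m).keys.Nodup := PySem.Dict.nodup_keys_ofList m
  cases hlk : pvLook (PySem.List.sorted (PySem.Dict.ofList m).items (fun kv => kv.1) false) k with
  | none =>
    have h1 := (pvLook_eq_none_iff _ k).mp hlk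
    have h2 : k ∉ (PySem.Dict.ofList m).keys := by
      intro hm
      exact h1 (((hperm.map Prod.fst).mem_iff).mpr (by simpa [PySem.Dict.keys] using hm))
    exact ((PySem.Dict.get?_eq_none_iff_not_mem_keys _ k).mpr h2).symm
  | some v =>
    have h1 : (k, v) ∈ (PySem.Dict.ofList m).items := hperm.subset (pvLook_some_mem _ k v hlk)
    exact ((PySem.Dict.get?_eq_some_iff_mem_items _ k v hnd).mpr h1).symm

theorem pvFL_cons_left (p : String × String) (a b : List (String × String)) (k : String)
    (h : k ≠ p.1) : pvFL (p :: a) b k = pvFL a b k := by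
  obtain ⟨k', v⟩ := p
  have : (k' == k) = false := by simpa [beq_iff_eq] using (Ne.symm h)
  simp [pvFL, pvLook, this]

theorem pvFL_cons_right (p : String × String) (a b : List (String × String)) (k : String)
    (h : k ≠ p.1) : pvFL a (p :: b) k = pvFL a b k := by
  obtain ⟨k', v⟩ := p
  have : (k' == k) = false := by simpa [beq_iff_eq] using (Ne.symm h)
  simp [pvFL, pvLook, this]

theorem nodup_keys_of_pairwise (l : List (String × String))
    (h : l.Pairwise (fun p q => p.1 < q.1)) : (l.map Prod.fst).Nodup :=
  List.pairwise_map.mpr (h.imp (fun hpq => ne_of_lt hpq))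

-- the merge loop computes the label selector along the merged key list
theorem pvMerge_eq : ∀ (a b : List (String × String)),
    a.Pairwise (fun p q => p.1 < q.1) → b.Pairwise (fun p q => p.1 < q.1) →
    pvMerge a b = (mergeK (a.map Prod.fst) (b.map Prod.fst)).filterMap (pvFL a b) := by
  intro a
  induction a with
  | nil =>
    intro b _ hb
    rw [show pvMerge [] b = b.map (fun p => pvFmt p.1 none (some p.2)) from by simp [pvMerge]]
    rw [List.map_nil,
      show mergeK ([] : List String) (b.map Prod.fst) = b.map Prod.fst from by simp [mergeK]]
    rw [List.filterMap_map]
    have : ∀ p ∈ b, (pvFL [] b ∘ Prod.fst) p = some (pvFmt p.1 none (some p.2)) := by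
      intro p hp
      obtain ⟨k, v⟩ := p
      have hlk : pvLook b k = some v := pvLook_of_mem b k v hp (nodup_keys_of_pairwise b hb)
      simp only [Function.comp_apply, pvFL]
      rw [hlk]
      simp [pvLook]
    rw [List.filterMap_congr this]
    simp
  | cons pa as_ iha =>
    intro b
    induction b with
    | nil =>
      intro ha _
      obtain ⟨ka, va⟩ := pa
      rw [show pvMerge ((ka, va) :: as_) [] =
          ((ka, va) :: as_).map (fun p => pvFmt p.1 (some p.2) none) from by simp [pvMerge]]
      rw [List.map_nil,
        show mergeK (((ka, va) :: as_).map Prod.fst) ([] : List String)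
          = ((ka, va) :: as_).map Prod.fst from by
            cases hm : ((ka, va) :: as_).map Prod.fst <;> simp [mergeK]]
      rw [List.filterMap_map]
      have : ∀ p ∈ (ka, va) :: as_, (pvFL ((ka, va) :: as_) [] ∘ Prod.fst) p
          = some (pvFmt p.1 (some p.2) none) := by
        intro p hp
        obtain ⟨k, v⟩ := p
        have hlk : pvLook ((ka, va) :: as_) k = some v :=
          pvLook_of_mem _ k v hp (nodup_keys_of_pairwise _ ha)
        simp only [Function.comp_apply, pvFL]
        rw [hlk]
        simp [pvLook]
      rw [List.filterMap_congr this]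
      simp
    | cons pb bs ihb =>
      intro ha hb
      obtain ⟨ka, va⟩ := pa
      obtain ⟨kb, vb⟩ := pb
      have hka_self : pvLook ((ka, va) :: as_) ka = some va := by simp [pvLook]
      have hkb_self : pvLook ((kb, vb) :: bs) kb = some vb := by simp [pvLook]
      rcases lt_trichotomy ka kb with h | h | h
      · -- ka < kb : emit removal label for ka, advance left
        have hnotb : pvLook ((kb, vb) :: bs) ka = none := by
          rw [pvLook_eq_none_iff]
          intro hm
          rcases List.mem_map.mp hm with ⟨q, hq, hqk⟩
          rcases List.mem_cons.mp hq with rfl | hq2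
          · exact (ne_of_lt h) hqk.symm
          · have hlt := (List.pairwise_cons.mp hb).1 q hq2
            rw [hqk] at hlt
            exact lt_asymm h hlt
        have hhead : pvFL ((ka, va) :: as_) ((kb, vb) :: bs) ka
            = some (pvFmt ka (some va) none) := by
          simp [pvFL, hka_self, hnotb]
        rw [show pvMerge ((ka, va) :: as_) ((kb, vb) :: bs)
            = pvFmt ka (some va) none :: pvMerge as_ ((kb, vb) :: bs) from by simp [pvMerge, h]]
        rw [show mergeK (((ka, va) :: as_).map Prod.fst) (((kb, vb) :: bs).map Prod.fst)
            = ka :: mergeK (as_.map Prod.fst) (((kb, vb) :: bs).map Prod.fst) from by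
          simp [mergeK, h]]
        rw [List.filterMap_cons, hhead]
        have hcongr : ∀ k ∈ mergeK (as_.map Prod.fst) (((kb, vb) :: bs).map Prod.fst),
            pvFL ((ka, va) :: as_) ((kb, vb) :: bs) k = pvFL as_ ((kb, vb) :: bs) k := by
          intro k hk
          apply pvFL_cons_left
          rcases (mem_mergeK _ _ k).mp hk with hk1 | hk1
          · rcases List.mem_map.mp hk1 with ⟨q, hq, rfl⟩
            exact ne_of_gt ((List.pairwise_cons.mp ha).1 q hq)
          · rcases List.mem_map.mp hk1 with ⟨q, hq, rfl⟩
            rcases List.mem_cons.mp hq with rfl | hq2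
            · exact ne_of_gt h
            · exact ne_of_gt (h.trans ((List.pairwise_cons.mp hb).1 q hq2))
        rw [List.filterMap_congr hcongr, iha ((kb, vb) :: bs) ha.tail hb]
      · -- ka = kb : keys line up, compare values, advance both
        subst h
        rw [show pvMerge ((ka, va) :: as_) ((ka, vb) :: bs)
            = (if va == vb then [] else [pvFmt ka (some va) (some vb)]) ++ pvMerge as_ bs from by
          simp [pvMerge, lt_irrefl]]
        rw [show mergeK (((ka, va) :: as_).map Prod.fst) (((ka, vb) :: bs).map Prod.fst)
            = ka :: mergeK (as_.map Prod.fst) (bs.map Prod.fst) from by simp [mergeK, lt_irrefl]]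
        have hhead : pvFL ((ka, va) :: as_) ((ka, vb) :: bs) ka
            = if va == vb then none else some (pvFmt ka (some va) (some vb)) := by
          by_cases hv : va == vb <;> simp [pvFL, hka_self, pvLook, hv]
        have hcongr : ∀ k ∈ mergeK (as_.map Prod.fst) (bs.map Prod.fst),
            pvFL ((ka, va) :: as_) ((ka, vb) :: bs) k = pvFL as_ bs k := by
          intro k hk
          have hne : k ≠ ka := by
            rcases (mem_mergeK _ _ k).mp hk with hk1 | hk1
            · rcases List.mem_map.mp hk1 with ⟨q, hq, rfl⟩
              exact ne_of_gt ((List.pairwise_cons.mp ha).1 q hq)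
            · rcases List.mem_map.mp hk1 with ⟨q, hq, rfl⟩
              exact ne_of_gt ((List.pairwise_cons.mp hb).1 q hq)
          rw [pvFL_cons_left _ _ _ _ hne, pvFL_cons_right _ _ _ _ hne]
        rw [List.filterMap_cons, hhead]
        by_cases hv : va == vb
        · simp only [hv, if_true]
          rw [List.filterMap_congr hcongr, iha bs ha.tail hb.tail, List.nil_append]
        · simp only [hv, if_false, Bool.false_eq_true]
          rw [List.filterMap_congr hcongr, iha bs ha.tail hb.tail]
          rfl
      · -- kb < ka : emit addition label for kb, advance right
        have hnota : pvLook ((ka, va) :: as_) kb = none := by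
          rw [pvLook_eq_none_iff]
          intro hm
          rcases List.mem_map.mp hm with ⟨q, hq, hqk⟩
          rcases List.mem_cons.mp hq with rfl | hq2
          · exact (ne_of_lt h) hqk.symm
          · have hlt := (List.pairwise_cons.mp ha).1 q hq2
            rw [hqk] at hlt
            exact lt_asymm h hlt
        have hhead : pvFL ((ka, va) :: as_) ((kb, vb) :: bs) kb
            = some (pvFmt kb none (some vb)) := by
          simp [pvFL, hnota, hkb_self]
        rw [show pvMerge ((ka, va) :: as_) ((kb, vb) :: bs)
            = pvFmt kb none (some vb) :: pvMerge ((ka, va) :: as_) bs from by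
          simp [pvMerge, h, not_lt_of_gt h]]
        rw [show mergeK (((ka, va) :: as_).map Prod.fst) (((kb, vb) :: bs).map Prod.fst)
            = kb :: mergeK (((ka, va) :: as_).map Prod.fst) (bs.map Prod.fst) from by
          simp [mergeK, h, not_lt_of_gt h]]
        rw [List.filterMap_cons, hhead]
        have hcongr : ∀ k ∈ mergeK (((ka, va) :: as_).map Prod.fst) (bs.map Prod.fst),
            pvFL ((ka, va) :: as_) ((kb, vb) :: bs) k = pvFL ((ka, va) :: as_) bs k := by
          intro k hk
          apply pvFL_cons_right
          rcases (mem_mergeK _ _ k).mp hk with hk1 | hk1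
          · rcases List.mem_map.mp hk1 with ⟨q, hq, rfl⟩
            rcases List.mem_cons.mp hq with rfl | hq2
            · exact ne_of_gt h
            · exact ne_of_gt (h.trans ((List.pairwise_cons.mp ha).1 q hq2))
          · rcases List.mem_map.mp hk1 with ⟨q, hq, rfl⟩
            exact ne_of_gt ((List.pairwise_cons.mp hb).1 q hq)
        rw [List.filterMap_congr hcongr, ihb ha hb.tail]

-- sorting the key union equals merging the two sorted key lists
theorem sortedUnion_eq (om nm : List (String × String)) :
    PySem.List.sorted
      (PySem.Set.union (PySem.Set.ofList (om.map Prod.fst))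
        (PySem.Set.ofList (nm.map Prod.fst))) (fun k => k) false
    = mergeK
        ((PySem.List.sorted (PySem.Dict.ofList om).items (fun kv => kv.1) false).map Prod.fst)
        ((PySem.List.sorted (PySem.Dict.ofList nm).items (fun kv => kv.1) false).map Prod.fst) := by
  have hpa := sorted_items_pairwise om
  have hpb := sorted_items_pairwise nm
  have hKa := List.pairwise_map.mpr hpa
  have hKb := List.pairwise_map.mpr hpb
  have hmerge_pw := pairwise_mergeK _ _ hKa hKb
  apply PySem.List.sorted_eq_of_perm_of_pairwise_lt _ _ _ _ hmerge_pw
  rw [List.perm_ext_iff_of_nodup (hmerge_pw.imp ne_of_lt)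
    (PySem.Set.nodup_union _ _ (PySem.Set.nodup_ofList _))]
  intro k
  have hmema : k ∈ (PySem.List.sorted (PySem.Dict.ofList om).items (fun kv => kv.1) false).map
      Prod.fst ↔ k ∈ om.map Prod.fst := by
    rw [((PySem.List.sorted_perm (PySem.Dict.ofList om).items (fun kv => kv.1) false).map
      Prod.fst).mem_iff]
    have : (PySem.Dict.ofList om).items.map Prod.fst = (PySem.Dict.ofList om).keys := by
      simp [PySem.Dict.keys]
    rw [this]
    have hkeys : (PySem.Dict.ofList (κ := String) (ν := String) om).keys
        = PySem.Set.update ([] : PySem.Set String) (om.map Prod.fst) := by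
      simpa [PySem.Dict.ofList, PySem.Dict.update, PySem.Dict.keys_empty] using
        PySem.Dict.keys_foldl_insert_key (κ := String) (ν := String) om Prod.fst
          (fun _ p => p.2) PySem.Dict.empty
    rw [hkeys, PySem.Set.mem_update]
    simp
  have hmemb : k ∈ (PySem.List.sorted (PySem.Dict.ofList nm).items (fun kv => kv.1) false).map
      Prod.fst ↔ k ∈ nm.map Prod.fst := by
    rw [((PySem.List.sorted_perm (PySem.Dict.ofList nm).items (fun kv => kv.1) false).map
      Prod.fst).mem_iff]
    have : (PySem.Dict.ofList nm).items.map Prod.fst = (PySem.Dict.ofList nm).keys := by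
      simp [PySem.Dict.keys]
    rw [this]
    have hkeys : (PySem.Dict.ofList (κ := String) (ν := String) nm).keys
        = PySem.Set.update ([] : PySem.Set String) (nm.map Prod.fst) := by
      simpa [PySem.Dict.ofList, PySem.Dict.update, PySem.Dict.keys_empty] using
        PySem.Dict.keys_foldl_insert_key (κ := String) (ν := String) nm Prod.fst
          (fun _ p => p.2) PySem.Dict.empty
    rw [hkeys, PySem.Set.mem_update]
    simp
  rw [mem_mergeK, hmema, hmemb, PySem.Set.mem_union, PySem.Set.mem_ofList, PySem.Set.mem_ofList]

theorem diff_eq (old_map new_map : List (String × String)) :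
    diff_attr_map old_map new_map = diff_attr_map_alt old_map new_map := by
  unfold diff_attr_map diff_attr_map_alt
  have hbranch :
      (fun (out : List String) (k : String) =>
        let old_value := pvGet old_map k
        let new_value := pvGet new_map k
        if old_value == new_value then out
        else out ++ [pvFmt k old_value new_value])
      = (fun (out : List String) (k : String) =>
        if pvGet old_map k == pvGet new_map k then out
        else out ++ [pvFmt k (pvGet old_map k) (pvGet new_map k)]) := rfl
  rw [hbranch, A_foldl, List.nil_append, sortedUnion_eq]
  have hF : pvF old_map new_map
      = pvFL (PySem.List.sorted (PySem.Dict.ofList old_map).items (fun kv => kv.1) false)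
             (PySem.List.sorted (PySem.Dict.ofList new_map).items (fun kv => kv.1) false) := by
    funext k
    rw [pvF, pvFL, pvLook_sorted_eq_get? old_map k, pvLook_sorted_eq_get? new_map k]
  rw [hF, ← pvMerge_eq _ _ (sorted_items_pairwise old_map) (sorted_items_pairwise new_map)]

-- ===== VERDICT (by name: the statement is the Claim_ definition above) =====
theorem diff_attr_map_spec : Claim_equal_diff_attr_map := by
  intro old_map new_map _
  exact diff_eq old_map new_map
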